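-- pv_equiv track=rewrite | github.com/kodsnack/advent_of_code_2017 | meldanya-python3/day24/day24.py | _build
-- ===== SOURCE A (Python) =====
-- def _build(root, comp, indent=1):
--     bridges = []
--     for c in comp:
--         c1, c2 = c
--         if c1 == root or c2 == root:
--             b = [c]
--             comp2 = comp[:]
--             comp2.remove(c)
--             bs = _build(c2 if c1 == root else c1, comp2, indent=indent+1)
--             for b2 in bs:
--                 bridges.append(b + b2)
--             if not bs:
--                 bridges.append(b)
--
--     return bridges
-- ===== SOURCE B (Python) =====
-- def _removed(rem, c):
--     rem2 = rem[:]
--     rem2.remove(c)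
--     return rem2
--
--
-- def _build(root, comp, indent=1):
--     # Iterative DFS with an explicit stack instead of recursion.
--     bridges = []
--     stack = [(root, comp, [])]
--     while stack:
--         r, rem, path = stack.pop()
--         succs = [(c2 if c1 == r else c1, _removed(rem, (c1, c2)), path + [(c1, c2)])
--                  for (c1, c2) in rem if c1 == r or c2 == r]
--         if succs:
--             stack.extend(reversed(succs))
--         elif path:
--             bridges.append(path)
--     return bridges
-- ===== Notes on version B (the rewrite author's own statement) =====
-- stated objective: alternative
-- what changed: Replaced A's recursive enumeration (results combined bottom-up with per-level list concatenations) by an iterative DFS over an explicit stack of (root, remaining, path) states that emits each completed bridge once at a leaf, pushing successors in reverse so pop order reproduces A's output order exactly.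
import Mathlib
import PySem

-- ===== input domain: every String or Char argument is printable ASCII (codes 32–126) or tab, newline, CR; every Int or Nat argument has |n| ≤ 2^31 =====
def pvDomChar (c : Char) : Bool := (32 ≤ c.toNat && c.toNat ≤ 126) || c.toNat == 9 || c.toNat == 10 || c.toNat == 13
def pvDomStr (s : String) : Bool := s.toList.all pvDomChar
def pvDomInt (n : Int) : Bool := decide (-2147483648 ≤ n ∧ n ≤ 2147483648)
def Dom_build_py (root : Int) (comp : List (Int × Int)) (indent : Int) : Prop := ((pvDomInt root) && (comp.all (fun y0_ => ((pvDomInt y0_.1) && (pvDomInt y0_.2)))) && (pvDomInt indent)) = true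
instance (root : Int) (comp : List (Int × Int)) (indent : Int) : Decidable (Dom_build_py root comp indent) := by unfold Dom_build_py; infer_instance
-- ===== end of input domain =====

-- B replaces A's recursion (results combined bottom-up) by an explicit-stack DFS emitting
-- completed bridges at the leaves; same output, same cost (objective: alternative).

-- ===== PORT A =====
-- A's recursion shrinks `comp` by one at each call; the fuel argument (`comp.length + 1` at the
-- top) only makes this totality explicit, it is never exhausted on reachable calls.
def buildA : Nat → Int → List (Int × Int) → Int → List (List (Int × Int))
  | 0, _, _, _ => []
  | fuel + 1, root, comp, indent =>
    comp.foldl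
      (fun bridges c =>
        if c.1 = root ∨ c.2 = root then
          -- comp2 = comp[:]; comp2.remove(c)  (c ∈ comp here, so remove? never returns none)
          let comp2 := (PySem.List.remove? comp c).getD []
          let bs := buildA fuel (if c.1 = root then c.2 else c.1) comp2 (indent + 1)
          (bridges ++ bs.map (fun b2 => [c] ++ b2)) ++ (if bs = [] then [[c]] else [])
        else bridges)
      []

def build_py (root : Int) (comp : List (Int × Int)) (indent : Int) : List (List (Int × Int)) :=
  buildA (comp.length + 1) root comp indent

-- ===== PORT B =====
-- _removed(rem, c)
def pvRemoved (rem : List (Int × Int)) (c : Int × Int) : List (Int × Int) :=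
  (PySem.List.remove? rem c).getD []

-- the successor list comprehension
def pvSuccs (r : Int) (rem : List (Int × Int)) (path : List (Int × Int)) :
    List (Int × List (Int × Int) × List (Int × Int)) :=
  (rem.filter (fun c => decide (c.1 = r ∨ c.2 = r))).map
    (fun c => (if c.1 = r then c.2 else c.1, pvRemoved rem c, path ++ [c]))

def pvWeight (s : Int × List (Int × Int) × List (Int × Int)) : Nat :=
  Nat.factorial (s.2.1.length + 1)

-- termination lemma for the stack loop, cited by `decreasing_by`
theorem pvSum_map_const {α : Type} (l : List α) (f : α → Nat) (w : Nat)
    (h : ∀ x ∈ l, f x = w) : (l.map f).sum = l.length * w := by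
  induction l with
  | nil => simp
  | cons a t ih =>
    simp only [List.map_cons, List.sum_cons, List.length_cons]
    rw [ih (fun x hx => h x (List.mem_cons_of_mem a hx)), h a List.mem_cons_self]
    ring

-- termination lemma for the stack loop, cited by `decreasing_by`
theorem pvSuccs_weight_lt (r : Int) (rem : List (Int × Int)) (path : List (Int × Int))
    (h : pvSuccs r rem path ≠ []) :
    ((pvSuccs r rem path).map pvWeight).sum < Nat.factorial (rem.length + 1) := by
  have hw : ∀ s ∈ pvSuccs r rem path, pvWeight s = Nat.factorial rem.length := by
    intro s hs
    unfold pvSuccs at hs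
    rcases List.mem_map.1 hs with ⟨c, hc, rfl⟩
    have hcm : c ∈ rem := List.mem_of_mem_filter hc
    have hrem : pvRemoved rem c = rem.erase c := by
      unfold pvRemoved
      rw [PySem.List.remove?_eq_some_erase rem c hcm]; rfl
    have hlen : (rem.erase c).length + 1 = rem.length := List.length_erase_add_one hcm
    simp [pvWeight, hrem, hlen]
  have hsum := pvSum_map_const (pvSuccs r rem path) pvWeight (Nat.factorial rem.length) hw
  have hk : (pvSuccs r rem path).length ≤ rem.length := by
    unfold pvSuccs
    simpa using List.length_filter_le _ rem
  have hne : rem ≠ [] := by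
    intro hnil
    apply h
    simp [pvSuccs, hnil]
  have hn1 : 1 ≤ rem.length := by
    cases rem with
    | nil => exact absurd rfl hne
    | cons a l => simp
  rw [hsum, Nat.factorial_succ]
  have hfp : 0 < Nat.factorial rem.length := Nat.factorial_pos _
  calc (pvSuccs r rem path).length * Nat.factorial rem.length
      ≤ rem.length * Nat.factorial rem.length := Nat.mul_le_mul_right _ hk
    _ < (rem.length + 1) * Nat.factorial rem.length := by
        exact (Nat.mul_lt_mul_right hfp).mpr (Nat.lt_succ_self _)

def stackLoop : List (Int × List (Int × Int) × List (Int × Int)) →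
    List (List (Int × Int)) → List (List (Int × Int))
  | [], bridges => bridges
  | s :: rest, bridges =>
    let succs := pvSuccs s.1 s.2.1 s.2.2
    if h : succs ≠ [] then
      stackLoop (succs ++ rest) bridges
    else if s.2.2 ≠ [] then
      stackLoop rest (bridges ++ [s.2.2])
    else
      stackLoop rest bridges
  termination_by stack _ => (stack.map pvWeight).sum
  decreasing_by
  · simp only [List.map_append, List.sum_append, List.map_cons, List.sum_cons]
    have := pvSuccs_weight_lt s.1 s.2.1 s.2.2 h
    simp only [pvWeight]
    omega
  · simp only [List.map_cons, List.sum_cons]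
    have := Nat.factorial_pos (s.2.1.length + 1)
    simp only [pvWeight]; omega
  · simp only [List.map_cons, List.sum_cons]
    have := Nat.factorial_pos (s.2.1.length + 1)
    simp only [pvWeight]; omega

def build_py_alt (root : Int) (comp : List (Int × Int)) (indent : Int) : List (List (Int × Int)) :=
  stackLoop [(root, comp, [])] []

-- ===== PRECONDITION & SPEC =====
def Spec_build_py (root : Int) (comp : List (Int × Int)) (indent : Int) (out : List (List (Int × Int))) : Prop := out = build_py_alt root comp indent
instance (root : Int) (comp : List (Int × Int)) (indent : Int) (out : List (List (Int × Int))) : Decidable (Spec_build_py root comp indent out) := by unfold Spec_build_py; infer_instance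

-- ===== CLAIM (what is proved, stated in full; the proofs are below) =====
def Claim_equal_build_py : Prop := ∀ (root : Int) (comp : List (Int × Int)) (indent : Int), Dom_build_py root comp indent → Spec_build_py root comp indent (build_py root comp indent)

-- ===== LEMMAS AND PROOFS =====

-- the indent argument never influences buildA's result
theorem buildA_indent (fuel : Nat) (r : Int) (comp : List (Int × Int)) (i j : Int) :
    buildA fuel r comp i = buildA fuel r comp j := by
  induction fuel generalizing r comp i j with
  | zero => rfl
  | succ fuel ih =>
    simp only [buildA]
    apply PySem.List.foldl_congr_mem
    intro acc c _
    by_cases hp : c.1 = r ∨ c.2 = r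
    · simp only [if_pos hp,
        show ∀ r' c', buildA fuel r' c' (i + 1) = buildA fuel r' c' (j + 1) from
          fun r' c' => ih r' c' (i + 1) (j + 1)]
    · simp only [if_neg hp]

theorem pvFlatMap_ite_filter {α β : Type} (l : List α) (P : α → Prop) [DecidablePred P]
    (g : α → List β) :
    (l.flatMap fun x => if P x then g x else []) =
      (l.filter fun x => decide (P x)).flatMap g := by
  induction l with
  | nil => rfl
  | cons a t ih =>
    by_cases hp : P a
    · simp [hp, ih]
    · simp [hp, ih]

-- one unfolding of A's loop as a flatMap over the matching components
theorem buildA_char (n : Nat) (r : Int) (rem : List (Int × Int)) (i : Int) :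
    buildA (n + 1) r rem i =
      (rem.filter fun c => decide (c.1 = r ∨ c.2 = r)).flatMap
        (fun c =>
          let bs := buildA n (if c.1 = r then c.2 else c.1)
              ((PySem.List.remove? rem c).getD []) (i + 1)
          bs.map (fun b2 => [c] ++ b2) ++ (if bs = [] then [[c]] else [])) := by
  simp only [buildA]
  have hstep :
      (fun (bridges : List (List (Int × Int))) (c : Int × Int) =>
        if c.1 = r ∨ c.2 = r then
          let comp2 := (PySem.List.remove? rem c).getD []
          let bs := buildA n (if c.1 = r then c.2 else c.1) comp2 (i + 1)
          (bridges ++ bs.map (fun b2 => [c] ++ b2)) ++ (if bs = [] then [[c]] else [])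
        else bridges) =
      (fun bridges c =>
        bridges ++
          (if c.1 = r ∨ c.2 = r then
            (let bs := buildA n (if c.1 = r then c.2 else c.1)
                ((PySem.List.remove? rem c).getD []) (i + 1)
             bs.map (fun b2 => [c] ++ b2) ++ (if bs = [] then [[c]] else []))
          else [])) := by
    funext bridges c
    by_cases hp : c.1 = r ∨ c.2 = r
    · simp [hp, List.append_assoc]
    · simp [hp]
  rw [hstep, PySem.List.foldl_append_eq_flatMap, pvFlatMap_ite_filter]
  rfl

-- A returns no bridge exactly when no component matches the root
theorem buildA_eq_nil_iff (n : Nat) (r : Int) (rem : List (Int × Int)) (i : Int) :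
    buildA (n + 1) r rem i = [] ↔
      (rem.filter fun c => decide (c.1 = r ∨ c.2 = r)) = [] := by
  rw [buildA_char, List.flatMap_eq_nil_iff]
  constructor
  · intro h
    by_contra hne
    rcases List.exists_mem_of_ne_nil _ hne with ⟨c, hc⟩
    have := h c hc
    by_cases hbs : buildA n (if c.1 = r then c.2 else c.1)
        ((PySem.List.remove? rem c).getD []) (i + 1) = [] <;> simp [hbs] at this
  · intro h c hc
    rw [h] at hc
    cases hc

-- what one stack state eventually contributes to the output
def pvEmit (s : Int × List (Int × Int) × List (Int × Int)) : List (List (Int × Int)) :=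
  let bs := buildA (s.2.1.length + 1) s.1 s.2.1 1
  if bs = [] then (if s.2.2 = [] then [] else [s.2.2]) else bs.map (fun b2 => s.2.2 ++ b2)

theorem pvSuccs_flatMap_emit (r : Int) (rem : List (Int × Int)) (path : List (Int × Int))
    (h : pvSuccs r rem path ≠ []) :
    (pvSuccs r rem path).flatMap pvEmit = pvEmit (r, rem, path) := by
  have hF : (rem.filter fun c => decide (c.1 = r ∨ c.2 = r)) ≠ [] := by
    intro hnil
    exact h (by unfold pvSuccs; rw [hnil]; rfl)
  have hb0 : buildA (rem.length + 1) r rem 1 ≠ [] := by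
    intro hnil
    exact hF ((buildA_eq_nil_iff _ _ _ _).mp hnil)
  unfold pvSuccs
  rw [List.flatMap_map]
  have hRHS : pvEmit (r, rem, path)
      = (buildA (rem.length + 1) r rem 1).map (fun b2 => path ++ b2) := by
    simp only [pvEmit, if_neg hb0]
  rw [hRHS, buildA_char rem.length r rem 1, List.map_flatMap]
  refine List.flatMap_congr ?_
  intro c hc
  have hcm : c ∈ rem := List.mem_of_mem_filter hc
  have hrem : (PySem.List.remove? rem c).getD [] = rem.erase c := by
    rw [PySem.List.remove?_eq_some_erase rem c hcm]; rfl
  have hlen : (rem.erase c).length + 1 = rem.length := List.length_erase_add_one hcm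
  simp only [pvEmit, pvRemoved, hrem, hlen]
  rw [buildA_indent rem.length (if c.1 = r then c.2 else c.1) (rem.erase c) 1 2]
  by_cases hbs : buildA rem.length (if c.1 = r then c.2 else c.1) (rem.erase c) 2 = []
  · simp [hbs]
  · simp [hbs, List.map_map, Function.comp, List.append_assoc]

-- the stack loop appends exactly the contributions of its states, in order
theorem stackLoop_eq (stack : List (Int × List (Int × Int) × List (Int × Int)))
    (bridges : List (List (Int × Int))) :
    stackLoop stack bridges = bridges ++ stack.flatMap pvEmit := by
  induction stack, bridges using stackLoop.induct with
  | case1 bridges => simp [stackLoop]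
  | case2 s rest bridges succs h ih =>
    have h' : pvSuccs s.1 s.2.1 s.2.2 ≠ [] := h
    rw [stackLoop, dif_pos h']
    rw [ih, List.flatMap_append, List.flatMap_cons,
      pvSuccs_flatMap_emit s.1 s.2.1 s.2.2 h']
  | case3 s rest bridges succs h hpath ih =>
    have h' : ¬ pvSuccs s.1 s.2.1 s.2.2 ≠ [] := h
    have hsn : pvSuccs s.1 s.2.1 s.2.2 = [] := not_not.mp h'
    unfold pvSuccs at hsn
    have hF := List.map_eq_nil_iff.mp hsn
    have hb0 : buildA (s.2.1.length + 1) s.1 s.2.1 1 = [] := (buildA_eq_nil_iff _ _ _ _).mpr hF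
    rw [stackLoop, dif_neg h', if_pos hpath, ih]
    simp [List.flatMap_cons, pvEmit, hb0, hpath, List.append_assoc]
  | case4 s rest bridges succs h hpath ih =>
    have h' : ¬ pvSuccs s.1 s.2.1 s.2.2 ≠ [] := h
    have hsn : pvSuccs s.1 s.2.1 s.2.2 = [] := not_not.mp h'
    unfold pvSuccs at hsn
    have hF := List.map_eq_nil_iff.mp hsn
    have hb0 : buildA (s.2.1.length + 1) s.1 s.2.1 1 = [] := (buildA_eq_nil_iff _ _ _ _).mpr hF
    have hpath' : s.2.2 = [] := not_not.mp hpath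
    rw [stackLoop, dif_neg h', if_neg hpath, ih]
    simp [List.flatMap_cons, pvEmit, hb0, hpath']

-- ===== VERDICT (by name: the statement is the Claim_ definition above) =====
theorem build_py_spec : Claim_equal_build_py := by
  intro root comp indent _
  show build_py root comp indent = build_py_alt root comp indent
  unfold build_py build_py_alt
  rw [stackLoop_eq]
  simp only [List.flatMap_cons, List.flatMap_nil, List.nil_append, List.append_nil, pvEmit]
  rw [buildA_indent (comp.length + 1) root comp indent 1]
  by_cases hb : buildA (comp.length + 1) root comp 1 = []
  · simp [hb]
  · simp [hb]
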